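-- pv_equiv track=rewrite | github.com/fulmenhq/pyfulmen | src/pyfulmen/docscribe/_formats.py | _split_yaml_stream
-- ===== SOURCE A (Python) =====
-- def _split_yaml_stream(content: str) -> list[str]:
--     """Split YAML stream into individual documents."""
--     # YAML uses --- as document separator
--     # Also supports ... as document end marker
--     docs = []
--     current_doc = []
--
--     lines = content.split("\n")
--
--     for line in lines:
--         if line.strip() in ("---", "..."):
--             if current_doc:
--                 docs.append("\n".join(current_doc))
--                 current_doc = []
--         else:
--             current_doc.append(line)
--
--     # Add final document
--     if current_doc:
--         docs.append("\n".join(current_doc))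
--
--     return [doc.strip() for doc in docs if doc.strip()]
-- ===== SOURCE B (Python) =====
-- def _split_yaml_stream(content: str) -> list[str]:
--     """Split YAML stream into individual documents.
--
--     Two-index scan over the line list: for each chunk, advance j to the next
--     '---'/'...' separator line, slice lines[i:j] out directly, strip it and
--     keep it if nonempty; no accumulation buffer, no flush logic."""
--     lines = content.split("\n")
--     n = len(lines)
--     out = []
--     i = 0
--     while i < n:
--         j = i
--         while j < n and lines[j].strip() not in ("---", "..."):
--             j += 1
--         doc = "\n".join(lines[i:j]).strip()
--         if doc:
--             out.append(doc)
--         i = j + 1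
--     return out
-- ===== Notes on version B (the rewrite author's own statement) =====
-- stated objective: alternative
-- what changed: Replaces A's flush-on-separator accumulation buffer with a two-index scan: an inner scan finds the next separator line, the chunk lines[i:j] is sliced out directly, stripped and kept if nonempty; there is no current_doc buffer and no duplicated final flush.
import Mathlib
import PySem

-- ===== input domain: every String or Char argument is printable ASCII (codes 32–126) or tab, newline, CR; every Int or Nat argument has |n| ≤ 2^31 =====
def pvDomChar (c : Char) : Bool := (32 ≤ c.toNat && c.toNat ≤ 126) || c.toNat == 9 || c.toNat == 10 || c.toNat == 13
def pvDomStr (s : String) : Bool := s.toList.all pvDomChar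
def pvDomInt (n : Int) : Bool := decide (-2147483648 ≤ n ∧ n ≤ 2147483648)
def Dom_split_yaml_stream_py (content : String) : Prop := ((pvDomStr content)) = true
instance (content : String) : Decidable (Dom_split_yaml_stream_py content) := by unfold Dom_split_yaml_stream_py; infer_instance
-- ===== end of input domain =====

-- B replaces A's flush-on-separator buffer with a two-index scan slicing each chunk lines[i:j] out directly (alternative; same cost).

-- ===== PORT A =====
-- content.split("\n")  (sep is the nonempty literal "\n", so Python never raises; none is unreachable)
def pvSplitLines (content : String) : List String :=
  match PySem.Str.split? content "\n" with
  | some lines => lines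
  | none => []

-- line.strip() in ("---", "...")
def pvIsSep (line : String) : Bool :=
  PySem.Str.strip line == "---" || PySem.Str.strip line == "..."

-- the body of A's for-loop over the state (docs, current_doc)
def pvStepA : List String × List String → String → List String × List String
  | (docs, current), line =>
    if pvIsSep line then
      if current = [] then (docs, current)
      else (docs ++ [PySem.Str.join "\n" current], [])
    else (docs, current ++ [line])

def split_yaml_stream_py (content : String) : List String :=
  let lines := pvSplitLines content
  let st := lines.foldl pvStepA ([], [])
  let docs := if st.2 = [] then st.1 else st.1 ++ [PySem.Str.join "\n" st.2]
  (docs.filter (fun doc => !(PySem.Str.strip doc == ""))).map PySem.Str.strip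

-- ===== PORT B =====
-- inner while: advance j to the next separator line (lines[j] is lines.getD j "", always in range since j < n = lines.length)
def pvScan (lines : List String) (n : Nat) (j : Nat) : Nat :=
  if _h : j < n ∧ pvIsSep (lines.getD j "") = false then pvScan lines n (j + 1) else j
  termination_by n - j
  decreasing_by omega

-- j ≤ pvScan lines n j (needed for pvAltLoop's termination)
theorem pvScan_ge (lines : List String) (n : Nat) : ∀ (k j : Nat), n - j ≤ k → j ≤ pvScan lines n j := by
  intro k
  induction k with
  | zero =>
    intro j hk
    rw [pvScan]
    split
    · omega
    · exact le_refl j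
  | succ k ih =>
    intro j hk
    rw [pvScan]
    split
    · next h => exact le_trans (by omega) (ih (j + 1) (by omega))
    · exact le_refl j

-- outer while over the index i with accumulator out
def pvAltLoop (lines : List String) (n : Nat) (i : Nat) (out : List String) : List String :=
  if _h : i < n then
    let j := pvScan lines n i
    let doc := PySem.Str.strip (PySem.Str.join "\n" (PySem.List.slice lines (some (i : Int)) (some (j : Int))))
    pvAltLoop lines n (j + 1) (if doc ≠ "" then out ++ [doc] else out)
  else out
  termination_by n - i
  decreasing_by
    have := pvScan_ge lines n (n - i) i (le_refl _)
    omega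

def split_yaml_stream_py_alt (content : String) : List String :=
  let lines := pvSplitLines content
  pvAltLoop lines lines.length 0 []

-- ===== PRECONDITION & SPEC =====
def Spec_split_yaml_stream_py (content : String) (out : List String) : Prop := out = split_yaml_stream_py_alt content
instance (content : String) (out : List String) : Decidable (Spec_split_yaml_stream_py content out) := by unfold Spec_split_yaml_stream_py; infer_instance

-- ===== CLAIM (what is proved, stated in full; the proofs are below) =====
def Claim_equal_split_yaml_stream_py : Prop := ∀ (content : String), Dom_split_yaml_stream_py content → Spec_split_yaml_stream_py content (split_yaml_stream_py content)

-- ===== LEMMAS AND PROOFS =====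

-- proof-side characterisation: the segments of a line list, built back to front
def pvSegs : List String → List (List String)
  | [] => [[]]
  | h :: t =>
    if pvIsSep h then [] :: pvSegs t
    else
      match pvSegs t with
      | [] => [[h]]  -- unreachable: pvSegs never returns []
      | s0 :: rest => (h :: s0) :: rest

-- prepend lines to the first segment
def pvConsFirst (c : List String) : List (List String) → List (List String)
  | [] => [c]
  | s0 :: rest => (c ++ s0) :: rest

-- the common value both ports compute: strip each joined segment, drop the empty ones
def pvF (ls : List String) : List String :=
  ((pvSegs ls).map (fun seg => PySem.Str.strip (PySem.Str.join "\n" seg))).filter (fun d => !(d == ""))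

theorem pvSegs_ne_nil (lines : List String) : pvSegs lines ≠ [] := by
  cases lines with
  | nil => simp [pvSegs]
  | cons h t =>
    simp only [pvSegs]
    split
    · simp
    · split <;> simp

theorem pvConsFirst_nil_of_ne (X : List (List String)) (h : X ≠ []) : pvConsFirst [] X = X := by
  cases X with
  | nil => exact absurd rfl h
  | cons s0 rest => simp [pvConsFirst]

-- A's finish step (the final "if current_doc: docs.append(...)")
def pvFinishA (st : List String × List String) : List String :=
  if st.2 = [] then st.1 else st.1 ++ [PySem.Str.join "\n" st.2]

-- A's loop keeps (docs, current) and flushes exactly the nonempty segments, joined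
theorem foldl_stepA (lines : List String) : ∀ (docs current : List String),
    pvFinishA (lines.foldl pvStepA (docs, current)) =
      docs ++ ((pvConsFirst current (pvSegs lines)).filter (fun s => !s.isEmpty)).map (PySem.Str.join "\n") := by
  induction lines with
  | nil =>
    intro docs current
    simp only [List.foldl_nil, pvSegs, pvConsFirst, List.append_nil, pvFinishA]
    by_cases hc : current = []
    · simp [hc]
    · have hc' : current.isEmpty = false := by simpa using hc
      simp [if_neg hc, List.filter, hc']
  | cons h t ih =>
    intro docs current
    simp only [List.foldl_cons, pvStepA, pvSegs]
    by_cases hs : pvIsSep h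
    · rw [if_pos hs, if_pos hs,
        show pvConsFirst current ([] :: pvSegs t) = current :: pvSegs t by simp [pvConsFirst]]
      by_cases hc : current = []
      · rw [if_pos hc, ih docs current, hc, pvConsFirst_nil_of_ne _ (pvSegs_ne_nil t)]
        simp [List.filter]
      · have hc' : current.isEmpty = false := by simpa using hc
        rw [if_neg hc, ih (docs ++ [PySem.Str.join "\n" current]) [],
          pvConsFirst_nil_of_ne _ (pvSegs_ne_nil t)]
        simp [hc', List.append_assoc]
    · rw [if_neg hs, if_neg hs, ih docs (current ++ [h])]
      cases hS : pvSegs t with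
      | nil => exact absurd hS (pvSegs_ne_nil t)
      | cons s0 rest => simp [pvConsFirst, List.append_assoc]

-- joining the empty segment gives "" and stripping "" gives ""
theorem pv_strip_join_nil : PySem.Str.strip (PySem.Str.join "\n" []) = "" := by decide

-- A's "drop empty buffers, join, strip-filter-map" equals the common form pvF
theorem pv_post (segs : List (List String)) :
    (((segs.filter (fun s => !s.isEmpty)).map (PySem.Str.join "\n")).filter
        (fun doc => !(PySem.Str.strip doc == ""))).map PySem.Str.strip
      = (segs.map (fun seg => PySem.Str.strip (PySem.Str.join "\n" seg))).filter
        (fun doc => !(doc == "")) := by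
  induction segs with
  | nil => rfl
  | cons s rest ih =>
    by_cases hs : s = []
    · subst hs
      simp only [List.filter_cons, List.map_cons, List.isEmpty_nil, Bool.not_true,
        Bool.false_eq_true, if_false, pv_strip_join_nil]
      simpa using ih
    · have hs' : s.isEmpty = false := by simpa using hs
      simp only [List.filter_cons, List.map_cons, hs', Bool.not_false, if_true]
      by_cases hd : PySem.Str.strip (PySem.Str.join "\n" s) = ""
      · simp [hd, ih]
      · simp [hd, ih]

-- pvSegs splits at the first separator
theorem pvSegs_split (p : String → Bool) (hp : p = fun l => !pvIsSep l) :
    ∀ (ls : List String),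
      (ls.dropWhile p = [] → pvSegs ls = [ls]) ∧
      (∀ d r, ls.dropWhile p = d :: r → pvSegs ls = ls.takeWhile p :: pvSegs r) := by
  subst hp
  intro ls
  induction ls with
  | nil => exact ⟨fun _ => rfl, fun d r h => by simp [List.dropWhile] at h⟩
  | cons h t ih =>
    by_cases hs : pvIsSep h
    · refine ⟨fun hnil => ?_, fun d r hdr => ?_⟩
      · simp [List.dropWhile, hs] at hnil
      · simp only [List.dropWhile, hs, Bool.not_true] at hdr
        simp only [List.takeWhile, hs, Bool.not_true]
        cases hdr
        simp [pvSegs, hs]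
    · refine ⟨fun hnil => ?_, fun d r hdr => ?_⟩
      · simp only [List.dropWhile, hs, Bool.not_false] at hnil
        have ht := ih.1 hnil
        simp [pvSegs, hs, ht]
      · simp only [List.dropWhile, hs, Bool.not_false] at hdr
        have ht := ih.2 d r hdr
        simp only [List.takeWhile, hs, Bool.not_false]
        simp [pvSegs, hs, ht]

-- the scan stops exactly after the takeWhile prefix of the remaining lines
theorem pvScan_spec (lines : List String) : ∀ (k j : Nat), lines.length - j ≤ k →
    pvScan lines lines.length j = j + ((lines.drop j).takeWhile (fun l => !pvIsSep l)).length := by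
  intro k
  induction k with
  | zero =>
    intro j hk
    rw [pvScan, dif_neg (by omega)]
    simp [List.drop_eq_nil_of_le (by omega : lines.length ≤ j)]
  | succ k ih =>
    intro j hk
    rw [pvScan]
    by_cases hj : j < lines.length
    · have hdrop : lines.drop j = lines[j] :: lines.drop (j + 1) := List.drop_eq_getElem_cons hj
      have hget : lines.getD j "" = lines[j] := List.getD_eq_getElem lines "" hj
      by_cases hs : pvIsSep lines[j]
      · rw [dif_neg (by rw [hget]; simp [hs])]
        rw [hdrop]
        simp [hs]
      · rw [dif_pos ⟨hj, by rw [hget]; simp [hs]⟩]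
        rw [ih (j + 1) (by omega), hdrop]
        simp only [List.takeWhile_cons, hs]
        simp
        omega
    · rw [dif_neg (by omega)]
      simp [List.drop_eq_nil_of_le (by omega : lines.length ≤ j)]

-- dropping past the takeWhile prefix and the separator behind it
theorem pv_drop_takeWhile_succ (p : String → Bool) : ∀ (ls : List String),
    ls.drop ((ls.takeWhile p).length + 1) = (ls.dropWhile p).drop 1 := by
  intro ls
  induction ls with
  | nil => rfl
  | cons h t ih =>
    by_cases hp : p h
    · simpa [hp] using ih
    · simp [hp]

-- ls.take |ls.takeWhile p| = ls.takeWhile p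
theorem pv_take_takeWhile (p : String → Bool) : ∀ (ls : List String),
    ls.take (ls.takeWhile p).length = ls.takeWhile p := by
  intro ls
  induction ls with
  | nil => rfl
  | cons h t ih =>
    by_cases hp : p h
    · simp [hp, ih]
    · simp [hp]

-- one unfolding of B's outer loop in the i < n case
theorem pvAltLoop_unfold (lines : List String) (n i : Nat) (out : List String) (h : i < n) :
    pvAltLoop lines n i out =
      pvAltLoop lines n (pvScan lines n i + 1)
        (if PySem.Str.strip (PySem.Str.join "\n"
              (PySem.List.slice lines (some (i : Int)) (some ((pvScan lines n i : Nat) : Int)))) ≠ ""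
          then out ++ [PySem.Str.strip (PySem.Str.join "\n"
              (PySem.List.slice lines (some (i : Int)) (some ((pvScan lines n i : Nat) : Int))))]
          else out) := by
  rw [pvAltLoop, dif_pos h]

theorem pvF_nil : pvF [] = [] := by
  simp [pvF, pvSegs, pv_strip_join_nil, List.filter]

-- B's loop computes out ++ pvF of the remaining lines
theorem pvAltLoop_spec (lines : List String) : ∀ (k i : Nat) (out : List String),
    lines.length - i ≤ k →
    pvAltLoop lines lines.length i out = out ++ pvF (lines.drop i) := by
  intro k
  induction k with
  | zero =>
    intro i out hk
    rw [pvAltLoop, dif_neg (by omega)]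
    rw [List.drop_eq_nil_of_le (by omega : lines.length ≤ i), pvF_nil, List.append_nil]
  | succ k ih =>
    intro i out hk
    by_cases hi : i < lines.length
    · rw [pvAltLoop_unfold lines lines.length i out hi]
      set p : String → Bool := fun l => !pvIsSep l with hp
      set ls := lines.drop i with hls
      have hj : pvScan lines lines.length i = i + (ls.takeWhile p).length :=
        pvScan_spec lines (k + 1) i hk
      have htwlen : (ls.takeWhile p).length ≤ ls.length :=
        List.Sublist.length_le (List.takeWhile_sublist p)
      have hlslen : ls.length = lines.length - i := by rw [hls, List.length_drop]
      -- the slice is exactly the takeWhile prefix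
      have hslice : PySem.List.slice lines (some (i : Int))
          (some ((pvScan lines lines.length i : Nat) : Int)) = ls.takeWhile p := by
        rw [PySem.List.slice_natCast, hj]
        have h0 : i + (ls.takeWhile p).length - i = (ls.takeWhile p).length := by omega
        rw [h0, ← hls, pv_take_takeWhile]
      -- the rest after the separator
      have hrest : lines.drop (pvScan lines lines.length i + 1) = (ls.dropWhile p).drop 1 := by
        rw [hj]
        have h0 : lines.drop (i + (ls.takeWhile p).length + 1)
            = (lines.drop i).drop ((ls.takeWhile p).length + 1) := by
          rw [List.drop_drop]
          congr 1
          try omega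
        rw [h0, ← hls, pv_drop_takeWhile_succ]
      rw [hslice]
      set doc := PySem.Str.strip (PySem.Str.join "\n" (ls.takeWhile p)) with hdoc
      cases hdw : ls.dropWhile p with
      | nil =>
        have htw : ls.takeWhile p = ls := by
          have h1 := List.takeWhile_append_dropWhile (p := p) (l := ls)
          rw [hdw, List.append_nil] at h1
          exact h1
        rw [ih (pvScan lines lines.length i + 1)
            (if doc ≠ "" then out ++ [doc] else out) (by omega), hrest, hdw, List.drop_nil,
          pvF_nil, List.append_nil]
        have hF : pvF ls = if doc ≠ "" then [doc] else [] := by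
          rw [pvF, (pvSegs_split p hp ls).1 hdw, ← htw]
          by_cases hd : doc = ""
          · simp [List.filter, ← hdoc, hd]
          · simp [List.filter, ← hdoc, hd]
        rw [hF]
        by_cases hd : doc = "" <;> simp [hd]
      | cons d r =>
        have hsegs := (pvSegs_split p hp ls).2 d r hdw
        have hr : r.length < ls.length := by
          have h1 := List.Sublist.length_le (List.dropWhile_sublist (p := p) (l := ls))
          rw [hdw] at h1
          simp at h1
          omega
        rw [ih (pvScan lines lines.length i + 1)
            (if doc ≠ "" then out ++ [doc] else out) (by omega), hrest, hdw]
        simp only [List.drop_one, List.tail_cons]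
        have hF : pvF ls = (if doc ≠ "" then [doc] else []) ++ pvF r := by
          rw [pvF, hsegs]
          by_cases hd : doc = ""
          · simp [← hdoc, hd, pvF]
          · simp [← hdoc, hd, pvF]
        rw [hF]
        by_cases hd : doc = "" <;> simp [hd]
    · rw [pvAltLoop, dif_neg (by omega)]
      rw [List.drop_eq_nil_of_le (by omega : lines.length ≤ i), pvF_nil, List.append_nil]

-- ===== VERDICT (by name: the statement is the Claim_ definition above) =====
theorem split_yaml_stream_py_spec : Claim_equal_split_yaml_stream_py := by
  intro content _
  unfold Spec_split_yaml_stream_py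
  have hA := foldl_stepA (pvSplitLines content) [] []
  rw [pvConsFirst_nil_of_ne _ (pvSegs_ne_nil _)] at hA
  have h1 : split_yaml_stream_py content =
      ((pvFinishA ((pvSplitLines content).foldl pvStepA ([], []))).filter
        (fun doc => !(PySem.Str.strip doc == ""))).map PySem.Str.strip := rfl
  have h2 : split_yaml_stream_py_alt content = pvF (pvSplitLines content) := by
    unfold split_yaml_stream_py_alt
    rw [pvAltLoop_spec (pvSplitLines content) (pvSplitLines content).length 0 [] (by omega)]
    simp
  rw [h2, h1, hA, List.nil_append, pv_post]
  rfl
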